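-- pv_equiv track=rewrite | github.com/Pablog137/DSA-and-Algorithms | Exercises/Exercises2.py | matryoshka
-- ===== SOURCE A (Python) =====
-- def matryoshka(nested_list: list):
--     for i in range(len(nested_list)):
--         for j in range(i + 1, len(nested_list)):
--             min_A = min(nested_list[i])
--             min_B = min(nested_list[j])
--             max_A = max(nested_list[i])
--             max_B = max(nested_list[j])
--
--             if not (
--                 (min_A > min_B and max_A < max_B) or (min_B > min_A and max_B < max_A)
--             ):
--                 return False
--     return True
-- ===== SOURCE B (Python) =====
-- def matryoshka(nested_list: list):
--     pairs = sorted(((min(l), max(l)) for l in nested_list), key=lambda p: p[0])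
--     for (pmin, pmax), (cmin, cmax) in zip(pairs, pairs[1:]):
--         if not (pmin < cmin and cmax < pmax):
--             return False
--     return True
-- ===== Notes on version B (the rewrite author's own statement) =====
-- stated objective: alternative
-- what changed: Instead of testing strict nesting for every index pair (recomputing min/max of both lists each time), B computes each list's (min, max) once, sorts these pairs by min, and checks strict nesting only between adjacent pairs of the sorted sequence (O(n*L + n log n) work, though A's early exit makes it as fast in practice).
-- outside the precondition, e.g. on matryoshka([[]]): A returns True, B raises ValueError; on matryoshka([[1, 2], [1, 3], []]): A returns False, B raises ValueError
import Mathlib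
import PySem

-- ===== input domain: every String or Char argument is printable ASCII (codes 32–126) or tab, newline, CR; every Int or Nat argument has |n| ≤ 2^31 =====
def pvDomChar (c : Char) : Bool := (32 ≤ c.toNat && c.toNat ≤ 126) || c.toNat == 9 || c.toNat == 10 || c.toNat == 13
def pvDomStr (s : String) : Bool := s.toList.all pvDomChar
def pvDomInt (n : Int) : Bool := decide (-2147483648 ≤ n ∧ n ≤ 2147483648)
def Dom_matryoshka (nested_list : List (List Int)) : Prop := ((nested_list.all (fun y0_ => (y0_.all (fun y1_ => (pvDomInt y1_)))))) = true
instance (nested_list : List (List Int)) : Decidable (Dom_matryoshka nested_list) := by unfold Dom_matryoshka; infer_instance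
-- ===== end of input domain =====

-- B computes every list's (min, max) once, sorts those pairs by min, and checks strict
-- nesting only between adjacent sorted pairs, instead of A's all-pairs test (objective: alternative).

-- ===== PORT A =====
def matryoshka (nested_list : List (List Int)) : Bool :=
  (PySem.List.pyRange 0 nested_list.length 1).all (fun i =>
    (PySem.List.pyRange (i + 1) nested_list.length 1).all (fun j =>
      let lA := PySem.List.pyGetD nested_list i []
      let lB := PySem.List.pyGetD nested_list j []
      let min_A := (PySem.List.min? lA (fun x => x)).getD 0
      let min_B := (PySem.List.min? lB (fun x => x)).getD 0
      let max_A := (PySem.List.max? lA (fun x => x)).getD 0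
      let max_B := (PySem.List.max? lB (fun x => x)).getD 0
      decide ((min_B < min_A ∧ max_A < max_B) ∨ (min_A < min_B ∧ max_B < max_A))))

-- ===== PORT B =====
-- the zip(pairs, pairs[1:]) loop of Source B, with its early 'return False'
def pvChain : List (Int × Int) → Bool
  | p :: q :: rest => (decide (p.1 < q.1) && decide (q.2 < p.2)) && pvChain (q :: rest)
  | _ => true

def matryoshka_alt (nested_list : List (List Int)) : Bool :=
  let pairs := PySem.List.sorted
    (nested_list.map (fun l =>
      ((PySem.List.min? l (fun x => x)).getD 0, (PySem.List.max? l (fun x => x)).getD 0)))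
    (fun p => p.1) false
  pvChain pairs

-- ===== PRECONDITION & SPEC =====
-- Pre_ excludes inputs containing an empty sublist: Python's min/max raise ValueError on them
-- (A only masks this when it early-returns False or has fewer than two lists; B raises on all of them).
def Pre_matryoshka (nested_list : List (List Int)) : Prop := ∀ l ∈ nested_list, l ≠ []
instance (nested_list : List (List Int)) : Decidable (Pre_matryoshka nested_list) := by
  unfold Pre_matryoshka; infer_instance

def pvWitness_matryoshka : List (List Int) := [[1, 4], [2, 3]]

def Spec_matryoshka (nested_list : List (List Int)) (out : Bool) : Prop := out = matryoshka_alt nested_list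
instance (nested_list : List (List Int)) (out : Bool) : Decidable (Spec_matryoshka nested_list out) := by unfold Spec_matryoshka; infer_instance

-- ===== CLAIM (what is proved, stated in full; the proofs are below) =====
def Claim_equal_matryoshka : Prop := ∀ (nested_list : List (List Int)), Dom_matryoshka nested_list → Pre_matryoshka nested_list → Spec_matryoshka nested_list (matryoshka nested_list)

-- ===== LEMMAS AND PROOFS =====

-- the strict-nesting relation on (min, max) pairs, and its adjacent (chain) form
def pvNest (p q : Int × Int) : Prop := (q.1 < p.1 ∧ p.2 < q.2) ∨ (p.1 < q.1 ∧ q.2 < p.2)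
def pvAdj (p q : Int × Int) : Prop := p.1 < q.1 ∧ q.2 < p.2

def pvMM (l : List Int) : Int × Int :=
  ((PySem.List.min? l (fun x => x)).getD 0, (PySem.List.max? l (fun x => x)).getD 0)

lemma pvNest_symm : Symmetric pvNest := by
  intro p q h; unfold pvNest at *; tauto

lemma pvChain_iff (l : List (Int × Int)) : pvChain l = true ↔ l.IsChain pvAdj := by
  induction l with
  | nil => simp [pvChain]
  | cons p t ih =>
    cases t with
    | nil => simp [pvChain]
    | cons q rest =>
      rw [List.isChain_cons_cons, ← ih]
      simp only [pvChain, Bool.and_eq_true, decide_eq_true_eq]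
      unfold pvAdj; tauto

lemma pvChain'_iff_pairwise (l : List (Int × Int)) : l.IsChain pvAdj ↔ l.Pairwise pvAdj := by
  haveI : Trans pvAdj pvAdj pvAdj :=
    ⟨by intro a b c h1 h2; exact ⟨lt_trans h1.1 h2.1, lt_trans h2.2 h1.2⟩⟩
  exact List.isChain_iff_pairwise

-- on a list sorted (non-strictly) by first component, pairwise nesting = pairwise pvAdj
lemma pvPairwise_sorted_iff (s : List (Int × Int))
    (hs : s.Pairwise (fun a b => a.1 ≤ b.1)) :
    s.Pairwise pvNest ↔ s.Pairwise pvAdj := by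
  constructor
  · intro h
    refine (h.and hs).imp fun {a b} hab => ?_
    obtain ⟨hn, hle⟩ := hab
    rcases hn with ⟨h1, _⟩ | h2
    · exact absurd hle (not_le.mpr h1)
    · exact h2
  · intro h; exact h.imp (fun h => Or.inr h)

-- A's double loop = Pairwise pvNest over the mapped (min, max) pairs
lemma pvA_iff (xs : List (List Int)) :
    matryoshka xs = true ↔ (xs.map pvMM).Pairwise pvNest := by
  unfold matryoshka
  rw [List.pairwise_iff_getElem]
  simp only [List.all_eq_true, PySem.List.mem_pyRange_one, decide_eq_true_eq,
    List.length_map, List.getElem_map]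
  constructor
  · intro h i j hi hj hij
    have := h (i : Int) ⟨by positivity, by exact_mod_cast hij.trans hj⟩
      (j : Int) ⟨by exact_mod_cast hij, by exact_mod_cast hj⟩
    rw [PySem.List.pyGetD_natCast, PySem.List.pyGetD_natCast,
      List.getD_eq_getElem _ _ hi, List.getD_eq_getElem _ _ hj] at this
    unfold pvNest pvMM
    simpa using this
  · intro h i hi j hj
    have hiN : i.toNat < xs.length := by omega
    have hjN : j.toNat < xs.length := by omega
    have := h i.toNat j.toNat hiN hjN (by omega)
    unfold pvNest pvMM at this
    rw [show i = ((i.toNat : Nat) : Int) by omega, show j = ((j.toNat : Nat) : Int) by omega,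
      PySem.List.pyGetD_natCast, PySem.List.pyGetD_natCast,
      List.getD_eq_getElem _ _ hiN, List.getD_eq_getElem _ _ hjN]
    simpa using this

-- ===== VERDICT (by name: the statement is the Claim_ definition above) =====
theorem matryoshka_spec : Claim_equal_matryoshka := by
  intro xs _ _
  unfold Spec_matryoshka matryoshka_alt
  have hsp := PySem.List.sorted_perm (xs.map (fun l =>
      ((PySem.List.min? l (fun x => x)).getD 0, (PySem.List.max? l (fun x => x)).getD 0)))
    (fun p => p.1) false
  have hso := PySem.List.sorted_pairwise (xs.map (fun l =>
      ((PySem.List.min? l (fun x => x)).getD 0, (PySem.List.max? l (fun x => x)).getD 0)))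
    (fun p => p.1)
  have hmap : (xs.map (fun l =>
      ((PySem.List.min? l (fun x => x)).getD 0, (PySem.List.max? l (fun x => x)).getD 0)))
      = xs.map pvMM := rfl
  rw [hmap] at hsp hso ⊢
  set s := PySem.List.sorted (xs.map pvMM) (fun p => p.1) false with hs
  have key : matryoshka xs = true ↔ pvChain s = true := by
    rw [pvA_iff, pvChain_iff, pvChain'_iff_pairwise, ← pvPairwise_sorted_iff s hso]
    constructor
    · intro h; exact h.perm hsp.symm (fun h => pvNest_symm h)
    · intro h; exact h.perm hsp (fun h => pvNest_symm h)
  cases hA : matryoshka xs with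
  | true => exact (key.mp hA).symm
  | false =>
    cases hB : pvChain s with
    | true => exact absurd (key.mpr hB) (by simp [hA])
    | false => rfl
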